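-- pv_equiv track=rewrite | github.com/damizhou/TrafficIngestor | tools/edge.py | _normalize_hosts
-- ===== SOURCE A (Python) =====
-- def _normalize_hosts(hosts):
--     """规范化主机名，避免空值、重复值和大小写差异。"""
--     normalized_hosts = []
--     seen = set()
--
--     for host in hosts or ():
--         normalized_host = str(host or "").strip().strip(".").lower()
--         if not normalized_host or normalized_host in seen:
--             continue
--         seen.add(normalized_host)
--         normalized_hosts.append(normalized_host)
--
--     return tuple(normalized_hosts)
-- ===== SOURCE B (Python) =====
-- def _normalize_hosts(hosts):
--     """规范化主机名，避免空值、重复值和大小写差异。"""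
--     norms = [str(h or "").strip().strip(".").lower() for h in hosts or ()]
--     first = {}
--     for i, n in reversed(list(enumerate(norms))):
--         first[n] = i
--     return tuple(n for i, n in enumerate(norms) if n and first[n] == i)
-- ===== Notes on version B (the rewrite author's own statement) =====
-- stated objective: alternative
-- what changed: B materializes all normalized strings in a staged pass, builds a first-occurrence index map by a reverse sweep (later writes overwritten by earlier ones), and then keeps each non-empty entry exactly when its index equals its first-occurrence index, eliminating A's running seen-set and continue branches.
import Mathlib
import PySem

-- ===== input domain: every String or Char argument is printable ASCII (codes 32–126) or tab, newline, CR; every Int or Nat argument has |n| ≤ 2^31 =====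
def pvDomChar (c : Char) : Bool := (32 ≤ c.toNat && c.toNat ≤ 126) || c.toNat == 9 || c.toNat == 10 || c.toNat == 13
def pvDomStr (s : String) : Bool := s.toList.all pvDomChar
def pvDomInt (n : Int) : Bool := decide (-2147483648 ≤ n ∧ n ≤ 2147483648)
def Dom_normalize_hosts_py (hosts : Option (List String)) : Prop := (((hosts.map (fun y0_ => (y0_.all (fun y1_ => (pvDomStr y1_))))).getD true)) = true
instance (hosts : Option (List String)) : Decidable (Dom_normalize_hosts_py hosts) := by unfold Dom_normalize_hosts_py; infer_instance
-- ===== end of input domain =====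

-- B stages the work: it materializes all normalized strings, builds a first-occurrence
-- index dict by a reverse sweep, then keeps each non-empty entry iff its index is its
-- first-occurrence index — an alternative decomposition without A's running seen-set.


-- shared normalization expression: str(host or "").strip().strip(".").lower()
-- ('host or ""' is the identity on strings: "" stays "", nonempty stays itself)
def pvNorm (h : String) : String :=
  PySem.Str.lower (PySem.Str.stripChars (PySem.Str.strip (if h == "" then "" else h)) ".")

-- ===== PORT A =====
-- the 'for host in hosts or ()' loop with its seen-set and continue branches
def pvLoopA : List String → List String → PySem.Set String → List String
  | [], acc, _ => acc
  | h :: t, acc, seen =>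
    let n := pvNorm h
    if n == "" || PySem.Set.contains seen n then pvLoopA t acc seen
    else pvLoopA t (acc ++ [n]) (PySem.Set.add seen n)

def normalize_hosts_py (hosts : Option (List String)) : List String :=
  pvLoopA (hosts.getD []) [] PySem.Set.empty

-- ===== PORT B =====
-- norms = [...]; first-occurrence dict via the reversed-enumerate loop 'first[n] = i';
-- then tuple(n for i, n in enumerate(norms) if n and first[n] == i).
-- ('first[n]' ported as get? == some i: the key n is always present, being in norms.)
def normalize_hosts_py_alt (hosts : Option (List String)) : List String :=
  let norms := (hosts.getD []).map pvNorm
  let first := ((PySem.List.enumerate norms).reverse).foldl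
      (fun d p => PySem.Dict.insert d p.2 p.1) PySem.Dict.empty
  ((PySem.List.enumerate norms).filter
      (fun p => !(p.2 == "") && (PySem.Dict.get? first p.2 == some p.1))).map (·.2)

-- ===== PRECONDITION & SPEC =====
def Spec_normalize_hosts_py (hosts : Option (List String)) (out : List String) : Prop := out = normalize_hosts_py_alt hosts
instance (hosts : Option (List String)) (out : List String) : Decidable (Spec_normalize_hosts_py hosts out) := by unfold Spec_normalize_hosts_py; infer_instance

-- ===== CLAIM (what is proved, stated in full; the proofs are below) =====
def Claim_equal_normalize_hosts_py : Prop := ∀ (hosts : Option (List String)), Dom_normalize_hosts_py hosts → Spec_normalize_hosts_py hosts (normalize_hosts_py hosts)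

-- ===== LEMMAS AND PROOFS =====

-- the reverse-sweep insert loop answers lookups by the FIRST matching pair of the
-- original (un-reversed) list
lemma get?_foldl_insert_rev : ∀ (ps : List (Int × String)) (d : PySem.Dict String Int) (k : String),
    PySem.Dict.get? (ps.foldl (fun d p => PySem.Dict.insert d p.2 p.1) d) k
      = (match ps.reverse.find? (fun p => p.2 == k) with
         | some p => some p.1
         | none => PySem.Dict.get? d k) := by
  intro ps
  induction ps with
  | nil => intro d k; simp
  | cons p ps ih =>
    intro d k
    simp only [List.foldl_cons, List.reverse_cons, List.find?_append]
    rw [ih]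
    cases hf : ps.reverse.find? (fun q => q.2 == k) with
    | some q => simp
    | none =>
      by_cases hk : p.2 = k
      · subst hk; simp [List.find?, PySem.Dict.get?_insert_self]
      · have hb : (p.2 == k) = false := by simpa using hk
        simp [List.find?, hb]
        exact PySem.Dict.get?_insert_of_ne _ _ (Ne.symm hk)

lemma find?_enumerate_eq_none {l : List String} {n : String} (hn : n ∉ l) (s : Int) :
    (PySem.List.enumerate l s).find? (fun q => q.2 == n) = none := by
  rw [List.find?_eq_none]
  intro q hq
  rcases (PySem.List.mem_enumerate_iff _ _ _).mp hq with ⟨k, hk, rfl⟩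
  simp only [beq_iff_eq]
  intro h
  exact hn (h ▸ l.getElem_mem hk)

-- A's loop after an already-processed prefix 'pre' of normalized strings equals acc
-- followed by B's first-occurrence filter over the remaining normalized strings,
-- with first occurrences taken in the full list pre ++ rest.
lemma pvLoopA_eq_filter : ∀ (ys pre acc seen : List String),
    (∀ x : String, x ∈ seen ↔ x ∈ acc) →
    (∀ x : String, x ≠ "" → (x ∈ acc ↔ x ∈ pre)) →
    pvLoopA ys acc seen
      = acc ++ ((PySem.List.enumerate (ys.map pvNorm) (pre.length : Int)).filter
          (fun p => !(p.2 == "") &&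
            (((PySem.List.enumerate (pre ++ ys.map pvNorm) 0).find?
                (fun q => q.2 == p.2)).map (·.1) == some p.1))).map (·.2) := by
  intro ys
  induction ys with
  | nil => intro pre acc seen _ _; simp [pvLoopA]
  | cons h t ih =>
    intro pre acc seen hseen hpre
    have hlen1 : (pre.length : Int) + 1 = ((pre ++ [pvNorm h]).length : Int) := by simp
    have happ : pre ++ (pvNorm h :: t.map pvNorm) = (pre ++ [pvNorm h]) ++ t.map pvNorm := by simp
    have hsplit : PySem.List.enumerate (pre ++ (pvNorm h :: t.map pvNorm)) 0
        = PySem.List.enumerate pre 0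
          ++ ((pre.length : Int), pvNorm h) :: PySem.List.enumerate (t.map pvNorm) ((pre.length : Int) + 1) := by
      rw [PySem.List.enumerate_append]
      simp [PySem.List.enumerate_cons]
    -- the head's filter condition is: pvNorm h nonempty and absent from pre
    have hcond : ∀ (hne : pvNorm h ≠ ""),
        (((PySem.List.enumerate (pre ++ (pvNorm h :: t.map pvNorm)) 0).find?
            (fun q => q.2 == pvNorm h)).map (·.1) == some (pre.length : Int))
          = !(decide (pvNorm h ∈ pre)) := by
      intro hne
      rw [hsplit, List.find?_append]
      by_cases hp : pvNorm h ∈ pre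
      · rcases List.getElem_of_mem hp with ⟨k, hk, hkeq⟩
        have hsome : ((PySem.List.enumerate pre 0).find? (fun q => q.2 == pvNorm h)).isSome := by
          rw [List.find?_isSome]
          exact ⟨((0 : Int) + k, pre[k]), (PySem.List.mem_enumerate_iff _ _ _).mpr ⟨k, hk, rfl⟩,
            by simp [hkeq]⟩
        rcases Option.isSome_iff_exists.mp hsome with ⟨q, hq⟩
        have hqmem := List.mem_of_find?_eq_some hq
        rcases (PySem.List.mem_enumerate_iff _ _ _).mp hqmem with ⟨j, hj, rfl⟩
        have : (0 : Int) + j ≠ (pre.length : Int) := by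
          have : (j : Int) < (pre.length : Int) := by exact_mod_cast hj
          omega
        have hjj : ¬ j = pre.length := by omega
        simp [hq, hp, hjj]
      · rw [find?_enumerate_eq_none hp 0]
        simp [hp]
    simp only [pvLoopA, List.map_cons, PySem.List.enumerate_cons, List.filter_cons]
    by_cases he : pvNorm h = ""
    · rw [if_pos (by simp [he]), if_neg (by simp [he]), hlen1, happ]
      refine ih (pre ++ [pvNorm h]) acc seen hseen ?_
      intro x hx
      rw [hpre x hx]
      simp [he, hx]
    · by_cases hs : pvNorm h ∈ seen
      · have hp : pvNorm h ∈ pre := (hpre _ he).mp ((hseen _).mp hs)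
        rw [if_pos (by simp [PySem.Set.contains, hs]),
          if_neg (by simp [hcond he, hp]), hlen1, happ]
        refine ih (pre ++ [pvNorm h]) acc seen hseen ?_
        intro x hx
        rw [hpre x hx]
        constructor
        · intro hxp; exact List.mem_append_left _ hxp
        · intro hxp
          rcases List.mem_append.mp hxp with hxp | hxp
          · exact hxp
          · simp at hxp; rw [hxp]; exact hp
      · have hp : pvNorm h ∉ pre := fun hm => hs ((hseen _).mpr ((hpre _ he).mpr hm))
        rw [if_neg (by simp [PySem.Set.contains, hs, he]),
          if_pos (by simp [hcond he, hp, he]),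
          hlen1, happ,
          ih (pre ++ [pvNorm h]) (acc ++ [pvNorm h]) (PySem.Set.add seen (pvNorm h))
            (by intro x
                have : PySem.Set.add seen (pvNorm h) = seen ++ [pvNorm h] := by
                  simp [PySem.Set.add, hs]
                simp [this, hseen x])
            (by intro x hx
                simp only [List.mem_append, List.mem_singleton]
                rw [hpre x hx])]
        -- reassociate acc ++ (h :: rest) = (acc ++ [h]) ++ rest
        simp

-- ===== VERDICT (by name: the statement is the Claim_ definition above) =====
theorem normalize_hosts_py_spec : Claim_equal_normalize_hosts_py := by
  intro hosts _
  unfold Spec_normalize_hosts_py normalize_hosts_py normalize_hosts_py_alt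
  rw [pvLoopA_eq_filter (hosts.getD []) [] [] PySem.Set.empty
    (by intro x; simp [PySem.Set.empty]) (by intro x _; rfl)]
  simp only [List.nil_append, List.length_nil, Int.natCast_zero]
  refine congrArg (List.map _) (List.filter_congr ?_)
  intro p _
  rw [get?_foldl_insert_rev, List.reverse_reverse]
  cases hf : ((PySem.List.enumerate ((hosts.getD []).map pvNorm) 0).find? (fun q => q.2 == p.2)) with
  | some q => simp
  | none => simp
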